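-- pv_equiv track=rewrite | github.com/alexeybutyrev/leetcode-solutions | solutions/Minimum Deletions to Make String Balanced/solution.py | minimumDeletions
-- ===== SOURCE A (Python) =====
-- def minimumDeletions(s: str) -> int:
--     curr = 0
--     B = []
--     for x in s:
--         if x == 'b':
--             curr += 1
--         B.append(curr)
--
--     A = []
--     curr = 0
--     for x in s[::-1]:
--
--         if x == 'a':
--             curr += 1
--         A.append(curr)
--     A = A[::-1]
--     ans = len(s)
--     for i in range(len(s)):
--         ans = min(ans, B[i] + A[i]-1)
--     return ans
-- ===== SOURCE B (Python) =====
-- def minimumDeletions(s: str) -> int: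
--     # one pass, no prefix/suffix tables: running b-count and running best split cost
--     n = len(s)
--     run = n
--     b = 0
--     for x in s:
--         if x == 'b':
--             b += 1
--         run = min(run, b - 1) + (1 if x == 'a' else 0)
--     return min(n, run)
-- ===== Notes on version B (the rewrite author's own statement) =====
-- stated objective: simpler
-- what changed: Replaces A's three passes and two materialized prefix/suffix count tables by a single left-to-right pass maintaining only a running b-count and the running best split cost.
import Mathlib
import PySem

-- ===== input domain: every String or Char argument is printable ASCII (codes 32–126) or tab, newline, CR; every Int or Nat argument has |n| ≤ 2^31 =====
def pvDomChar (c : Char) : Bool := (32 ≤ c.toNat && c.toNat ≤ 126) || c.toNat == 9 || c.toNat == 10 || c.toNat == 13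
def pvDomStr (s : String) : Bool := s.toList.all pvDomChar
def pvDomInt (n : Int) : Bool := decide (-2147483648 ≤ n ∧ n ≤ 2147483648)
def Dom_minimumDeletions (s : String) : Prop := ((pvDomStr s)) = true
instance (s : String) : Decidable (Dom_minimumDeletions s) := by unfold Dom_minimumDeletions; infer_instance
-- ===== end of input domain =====

-- B replaces A's three passes and two prefix/suffix tables by one pass keeping a
-- running b-count and the running best; objective: simpler (no speed claim proved here).

-- ===== PORT A =====
def minimumDeletions (s : String) : Int :=
  let cs := s.toList
  -- first loop: B = prefix counts of 'b' (inclusive)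
  let p1 := cs.foldl (fun (p : Int × List Int) x =>
      let curr := if x = 'b' then p.1 + 1 else p.1
      (curr, p.2 ++ [curr])) (0, ([] : List Int))
  -- second loop over s[::-1]; slice? with step -1 never fails, .getD [] is unreachable
  let rev := (PySem.List.slice? cs none none (-1)).getD []
  let p2 := rev.foldl (fun (p : Int × List Int) x =>
      let curr := if x = 'a' then p.1 + 1 else p.1
      (curr, p.2 ++ [curr])) (0, ([] : List Int))
  let Al := (PySem.List.slice? p2.2 none none (-1)).getD []
  let n : Int := cs.length
  -- third loop: ans = min over range(len(s)); indices are always in range in Python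
  (PySem.List.pyRange 0 n 1).foldl (fun ans i =>
      min ans (PySem.List.pyGetD p1.2 i 0 + PySem.List.pyGetD Al i 0 - 1)) n

-- ===== PORT B =====
def minimumDeletions_alt (s : String) : Int :=
  let n : Int := s.toList.length
  let p := s.toList.foldl (fun (q : Int × Int) x =>
      let b := if x = 'b' then q.1 + 1 else q.1
      (b, min q.2 (b - 1) + (if x = 'a' then 1 else 0))) (0, n)
  min n p.2

-- ===== PRECONDITION & SPEC =====
def Spec_minimumDeletions (s : String) (out : Int) : Prop := out = minimumDeletions_alt s
instance (s : String) (out : Int) : Decidable (Spec_minimumDeletions s out) := by unfold Spec_minimumDeletions; infer_instance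

-- ===== CLAIM (what is proved, stated in full; the proofs are below) =====
def Claim_equal_minimumDeletions : Prop := ∀ (s : String), Dom_minimumDeletions s → Spec_minimumDeletions s (minimumDeletions s)

-- ===== LEMMAS AND PROOFS =====

-- prefix counts of occurrences of ch (inclusive), starting from k
def scanCnt (ch : Char) : Int → List Char → List Int
  | _, [] => []
  | k, c :: t =>
      let k' := if c = ch then k + 1 else k
      k' :: scanCnt ch k' t

def cnt (ch : Char) (cs : List Char) : Int := (cs.countP (fun c => c = ch) : Int)

-- suffix counts of 'a' (inclusive)
def aSuffix : List Char → List Int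
  | [] => []
  | c :: t => ((if c = 'a' then 1 else 0) + cnt 'a' t) :: aSuffix t

-- B's loop as structural recursion on the character list
def Bloop : Int → Int → List Char → Int
  | _, r, [] => r
  | b, r, c :: t =>
      let b' := if c = 'b' then b + 1 else b
      Bloop b' (min r (b' - 1) + (if c = 'a' then 1 else 0)) t

-- the zip-fold both sides reduce to
def zfold (m : Int) (l : List (Int × Int)) : Int :=
  l.foldl (fun acc p => min acc (p.1 + p.2 - 1)) m

theorem scanCnt_append (ch : Char) (xs : List Char) : ∀ (ys : List Char) (k : Int),
    scanCnt ch k (xs ++ ys) = scanCnt ch k xs ++ scanCnt ch (k + cnt ch xs) ys := by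
  induction xs with
  | nil => intro ys k; simp [scanCnt, cnt]
  | cons c t ih =>
      intro ys k
      simp only [List.cons_append, scanCnt, ih]
      have : (if c = ch then k + 1 else k) + cnt ch t = k + cnt ch (c :: t) := by
        simp only [cnt, List.countP_cons]
        split_ifs <;> simp_all <;> omega
      rw [this]

theorem length_scanCnt (ch : Char) : ∀ (cs : List Char) (k : Int),
    (scanCnt ch k cs).length = cs.length := by
  intro cs; induction cs with
  | nil => intro k; simp [scanCnt]
  | cons c t ih => intro k; simp [scanCnt, ih]

theorem length_aSuffix : ∀ (cs : List Char), (aSuffix cs).length = cs.length := by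
  intro cs; induction cs with
  | nil => simp [aSuffix]
  | cons c t ih => simp [aSuffix, ih]

-- A's two builder loops produce scanCnt
theorem build_eq (ch : Char) : ∀ (cs : List Char) (k : Int) (acc : List Int),
    (cs.foldl (fun (p : Int × List Int) x =>
      let curr := if x = ch then p.1 + 1 else p.1
      (curr, p.2 ++ [curr])) (k, acc)).2 = acc ++ scanCnt ch k cs := by
  intro cs; induction cs with
  | nil => intro k acc; simp [scanCnt]
  | cons c t ih => intro k acc; simp only [List.foldl_cons, ih, scanCnt]; simp

-- the reversed 'a'-scan of the reversed string is the suffix count list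
theorem rev_scan_eq_aSuffix : ∀ (cs : List Char),
    (scanCnt 'a' 0 cs.reverse).reverse = aSuffix cs := by
  intro cs; induction cs with
  | nil => simp [scanCnt, aSuffix]
  | cons c t ih =>
      have h : (c :: t).reverse = t.reverse ++ [c] := by simp
      rw [h, scanCnt_append]
      simp only [scanCnt, List.reverse_append, List.reverse_cons, List.reverse_nil,
        List.nil_append, List.cons_append, ih, aSuffix]
      have hc : cnt 'a' t.reverse = cnt 'a' t := by simp [cnt]
      simp only [zero_add, hc]
      congr 1
      simp only [cnt]
      split_ifs <;> simp_all <;> omega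

-- the indexed min-loop over two equal-length lists is the fold over their zip
theorem idx_loop_eq_zfold : ∀ (tX tY preX preY : List Int), tX.length = tY.length →
    preX.length = preY.length → ∀ (m : Int),
    (PySem.List.pyRange (preX.length : Int) ((preX.length : Int) + (tX.length : Int)) 1).foldl
      (fun ans i => min ans (PySem.List.pyGetD (preX ++ tX) i 0 + PySem.List.pyGetD (preY ++ tY) i 0 - 1)) m
    = zfold m (tX.zip tY) := by
  intro tX
  induction tX with
  | nil =>
      intro tY preX preY hlen _ m
      cases tY with
      | cons y ty => simp at hlen
      | nil =>
          rw [show ((preX.length : Int) + (([] : List Int).length : Int)) = (preX.length : Int) by simp]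
          rw [PySem.List.pyRange_one_eq_nil (le_refl _)]
          simp [zfold]
  | cons x tx ih =>
      intro tY preX preY hlen hpre m
      cases tY with
      | nil => simp at hlen
      | cons y ty =>
          have hlt : (preX.length : Int) < (preX.length : Int) + ((x :: tx).length : Int) := by
            push_cast [List.length_cons]; omega
          rw [PySem.List.pyRange_one_cons hlt, List.foldl_cons]
          have hgx : PySem.List.pyGetD (preX ++ x :: tx) (preX.length : Int) 0 = x := by
            simp [PySem.List.pyGetD_natCast, List.getD_eq_getElem?_getD]
          have hgy : PySem.List.pyGetD (preY ++ y :: ty) (preX.length : Int) 0 = y := by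
            rw [hpre]
            simp [PySem.List.pyGetD_natCast, List.getD_eq_getElem?_getD]
          rw [hgx, hgy]
          have hx : preX ++ x :: tx = (preX ++ [x]) ++ tx := by simp
          have hy : preY ++ y :: ty = (preY ++ [y]) ++ ty := by simp
          have hlen' : tx.length = ty.length := by simpa using hlen
          have hpre' : (preX ++ [x]).length = (preY ++ [y]).length := by simp [hpre]
          have hshift : ((preX ++ [x]).length : Int) = (preX.length : Int) + 1 := by simp
          have := ih ty (preX ++ [x]) (preY ++ [y]) hlen' hpre'
            (min m (x + y - 1))
          rw [hx, hy]
          rw [hshift] at this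
          have harith : (preX.length : Int) + ((x :: tx).length : Int)
              = (preX.length : Int) + 1 + (tx.length : Int) := by simp; omega
          rw [harith, this]
          simp [zfold]

-- pulling a min out of the zip-fold's initial value
theorem zfold_min_init : ∀ (l : List (Int × Int)) (x y : Int),
    zfold (min x y) l = min x (zfold y l) := by
  intro l
  induction l with
  | nil => intro x y; simp [zfold]
  | cons p t ih =>
      intro x y
      simp only [zfold, List.foldl_cons] at *
      rw [min_assoc, ih]

-- the crux: B's loop computes the zip-fold of A's tables
theorem Bloop_eq_zfold : ∀ (cs : List Char) (b r : Int),
    Bloop b r cs = zfold (r + cnt 'a' cs) ((scanCnt 'b' b cs).zip (aSuffix cs)) := by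
  intro cs
  induction cs with
  | nil => intro b r; simp [Bloop, zfold, scanCnt, aSuffix, cnt]
  | cons c t ih =>
      intro b r
      simp only [Bloop, scanCnt, aSuffix, List.zip_cons_cons, zfold, List.foldl_cons]
      rw [← zfold, ih]
      congr 1
      have hcnt : cnt 'a' (c :: t) = (if c = 'a' then 1 else 0) + cnt 'a' t := by
        simp only [cnt, List.countP_cons]
        split_ifs <;> simp_all <;> omega
      rw [hcnt]
      rcases le_total r ((if c = 'b' then b + 1 else b) - 1) with h | h <;>
        simp [min_def] <;> omega

-- B's foldl over pairs is Bloop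
theorem altFold_eq_Bloop : ∀ (cs : List Char) (b r : Int),
    (cs.foldl (fun (q : Int × Int) x =>
      let b := if x = 'b' then q.1 + 1 else q.1
      (b, min q.2 (b - 1) + (if x = 'a' then 1 else 0))) (b, r)).2 = Bloop b r cs := by
  intro cs
  induction cs with
  | nil => intro b r; simp [Bloop]
  | cons c t ih => intro b r; simp only [List.foldl_cons, Bloop]; exact ih _ _

theorem cnt_nonneg (ch : Char) (cs : List Char) : 0 ≤ cnt ch cs := by
  simp [cnt]

-- ===== VERDICT (by name: the statement is the Claim_ definition above) =====
theorem minimumDeletions_spec : Claim_equal_minimumDeletions := by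
  intro s _
  unfold Spec_minimumDeletions minimumDeletions minimumDeletions_alt
  simp only [PySem.List.slice?_none_none_neg_one, Option.getD_some]
  set cs := s.toList with hcs
  rw [build_eq 'b' cs 0 [], build_eq 'a' cs.reverse 0 []]
  simp only [List.nil_append]
  rw [rev_scan_eq_aSuffix, altFold_eq_Bloop, Bloop_eq_zfold]
  have hidx := idx_loop_eq_zfold (scanCnt 'b' 0 cs) (aSuffix cs) [] [] (by
    rw [length_scanCnt, length_aSuffix]) rfl ((cs.length : Int))
  simp only [List.nil_append, List.length_nil, Nat.cast_zero, zero_add,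
    length_scanCnt] at hidx
  rw [hidx]
  have hmin : (cs.length : Int) = min (cs.length : Int) ((cs.length : Int) + cnt 'a' cs) := by
    have := cnt_nonneg 'a' cs; omega
  conv_lhs => rw [hmin]
  rw [zfold_min_init]
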